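-- pv_equiv track=rewrite | github.com/joshanashakya/dissertation | workspace/dataset/java-python/GeeksForGeeks/2850/A/2.py | largestPalinSub
-- ===== SOURCE A (Python) =====
-- def largestPalinSub(s):
--
--     res = ""
--     mx = s[0]
--
--     # Find the largest character
--     for i in range(1, len(s)):
--         mx = max(mx, s[i])
--
--     # Append all occurrences of largest
--     # character to the resultant string
--     for i in range(0, len(s)):
--         if s[i] == mx:
--             res += s[i]
--
--     return res
-- ===== SOURCE B (Python) =====
-- def largestPalinSub(s):
--     t = sorted(s, reverse=True)
--     k = 0
--     while k < len(t) and t[k] == t[0]: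
--         k += 1
--     return ''.join(t[:k])
-- ===== Notes on version B (the rewrite author's own statement) =====
-- stated objective: alternative
-- what changed: Instead of computing the max character and then filtering/counting its occurrences, B sorts the string in descending order and returns the leading run of equal characters (a while-scan over the sorted list).
import Mathlib
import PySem

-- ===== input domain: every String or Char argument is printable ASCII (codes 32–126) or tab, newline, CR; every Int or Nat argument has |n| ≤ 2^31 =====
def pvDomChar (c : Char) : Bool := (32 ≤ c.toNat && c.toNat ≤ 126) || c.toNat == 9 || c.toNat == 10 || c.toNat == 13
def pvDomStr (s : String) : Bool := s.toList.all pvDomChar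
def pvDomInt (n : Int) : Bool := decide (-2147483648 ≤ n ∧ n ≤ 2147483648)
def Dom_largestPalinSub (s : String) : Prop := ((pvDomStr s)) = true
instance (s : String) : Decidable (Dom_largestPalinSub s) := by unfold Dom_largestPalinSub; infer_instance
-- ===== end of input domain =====

-- B sorts the string in descending order and returns the leading run of equal characters,
-- instead of A's max-then-filter two-pass construction; return values agree on nonempty strings.

-- ===== PORT A =====
def largestPalinSub (s : String) : String :=
  match s.toList with
  | [] => ""  -- Python: s[0] raises IndexError here; excluded by Pre_
  | c :: rest =>
    -- mx = s[0]; for i in range(1, len(s)): mx = max(mx, s[i])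
    let mx := rest.foldl (fun m x => max m x) c
    -- res = ""; for i in range(0, len(s)): if s[i] == mx: res += s[i]
    String.mk ((c :: rest).foldl (fun r x => if x = mx then r ++ [x] else r) [])

-- ===== PORT B =====
-- while k < len(t) and t[k] == t[0]: k += 1   (h = t[0]; counts the leading run)
def pvRunLen (h : Char) : List Char → Nat
  | [] => 0
  | c :: rest => if c = h then 1 + pvRunLen h rest else 0

def largestPalinSub_alt (s : String) : String :=
  match PySem.List.sorted s.toList (fun x => x) true with
  | [] => ""  -- while-loop guard k < len(t) fails immediately; ''.join([]) = ''
  | h :: rest => String.mk ((h :: rest).take (pvRunLen h (h :: rest)))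

-- ===== PRECONDITION & SPEC =====
-- Pre_ excludes only the empty string, on which A raises IndexError.
def Pre_largestPalinSub (s : String) : Prop := s ≠ ""
instance (s : String) : Decidable (Pre_largestPalinSub s) := by unfold Pre_largestPalinSub; infer_instance
def pvWitness_largestPalinSub : String := "abcba"

def Spec_largestPalinSub (s : String) (out : String) : Prop := out = largestPalinSub_alt s
instance (s : String) (out : String) : Decidable (Spec_largestPalinSub s out) := by unfold Spec_largestPalinSub; infer_instance

-- ===== CLAIM =====
def Claim_equal_largestPalinSub : Prop := ∀ (s : String), Dom_largestPalinSub s → Pre_largestPalinSub s → Spec_largestPalinSub s (largestPalinSub s)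

-- ===== LEMMAS AND PROOFS =====
lemma filterFold_eq (mx : Char) (l acc : List Char) :
    l.foldl (fun r x => if x = mx then r ++ [x] else r) acc
      = acc ++ l.filter (fun x => x = mx) := by
  induction l generalizing acc with
  | nil => simp
  | cons a l ih =>
    by_cases h : a = mx <;> simp [List.foldl, h, ih]

lemma filter_eq_replicate_count (mx : Char) (l : List Char) :
    l.filter (fun x => x = mx) = List.replicate (l.count mx) mx := by
  induction l with
  | nil => simp
  | cons a l ih =>
    by_cases h : a = mx
    · subst h; simp [ih, List.replicate_succ]
    · simp [h, ih]

lemma foldl_max_mem (c : Char) (l : List Char) :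
    l.foldl (fun m x => max m x) c ∈ c :: l := by
  induction l generalizing c with
  | nil => simp
  | cons a l ih =>
    simp only [List.foldl_cons]
    rcases List.mem_cons.mp (ih (max c a)) with heq | hmem
    · rw [heq]
      rcases max_choice c a with hm | hm <;> simp [hm]
    · simp [hmem]

lemma le_foldl_max (c : Char) (l : List Char) :
    ∀ x ∈ c :: l, x ≤ l.foldl (fun m x => max m x) c := by
  induction l generalizing c with
  | nil => simp
  | cons a l ih =>
    intro x hx
    simp only [List.foldl_cons]
    rcases List.mem_cons.mp hx with rfl | hx'
    · exact le_trans (le_max_left x a) (ih (max x a) (max x a) (by simp))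
    · rcases List.mem_cons.mp hx' with rfl | hx''
      · exact le_trans (le_max_right c x) (ih (max c x) (max c x) (by simp))
      · exact ih (max c a) x (List.mem_cons_of_mem _ hx'')

lemma take_runLen (h : Char) (t : List Char)
    (hp : t.Pairwise (fun a b => b ≤ a)) (hb : ∀ x ∈ t, x ≤ h) :
    t.take (pvRunLen h t) = List.replicate (t.count h) h := by
  induction t with
  | nil => simp [pvRunLen]
  | cons c rest ih =>
    rcases List.pairwise_cons.mp hp with ⟨hhead, htail⟩
    by_cases hc : c = h
    · subst hc
      have hrest := ih htail (fun x hx => hb x (by simp [hx]))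
      have h1 : pvRunLen c (c :: rest) = pvRunLen c rest + 1 := by
        simp [pvRunLen, Nat.add_comm]
      rw [h1, List.take_succ_cons, hrest, List.count_cons_self, List.replicate_succ]
    · have hlt : c < h := lt_of_le_of_ne (hb c (by simp)) hc
      have hcount : rest.count h = 0 := by
        rw [List.count_eq_zero]
        intro hmem
        exact absurd (lt_of_le_of_lt (hhead h hmem) hlt) (lt_irrefl h)
      simp [pvRunLen, hc, hcount]

lemma main_eq (c : Char) (rest : List Char) :
    String.mk ((c :: rest).foldl
        (fun r x => if x = rest.foldl (fun m x => max m x) c then r ++ [x] else r) [])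
      = (match PySem.List.sorted (c :: rest) (fun x => x) true with
         | [] => ""
         | h :: trest => String.mk ((h :: trest).take (pvRunLen h (h :: trest)))) := by
  cases ht : PySem.List.sorted (c :: rest) (fun x => x) true with
  | nil =>
    exact absurd ((PySem.List.sorted_eq_nil_iff (c :: rest) _ true).mp ht) (by simp)
  | cons h trest =>
    show _ = String.mk ((h :: trest).take (pvRunLen h (h :: trest)))
    have hperm : (h :: trest).Perm (c :: rest) := ht ▸ PySem.List.sorted_perm (c :: rest) _ true
    have hpw : (h :: trest).Pairwise (fun a b => b ≤ a) := by
      have := PySem.List.sorted_pairwise_rev (c :: rest) (fun x => x)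
      rw [ht] at this; exact this
    have hmem_h : h ∈ c :: rest := hperm.mem_iff.mp (by simp)
    have hhle : h ≤ rest.foldl (fun m x => max m x) c := le_foldl_max c rest h hmem_h
    have hmxle : rest.foldl (fun m x => max m x) c ≤ h := by
      have hmxmem : rest.foldl (fun m x => max m x) c ∈ h :: trest :=
        hperm.mem_iff.mpr (foldl_max_mem c rest)
      rcases List.mem_cons.mp hmxmem with heq | hm
      · exact le_of_eq heq
      · exact (List.pairwise_cons.mp hpw).1 _ hm
    have hEq : h = rest.foldl (fun m x => max m x) c := le_antisymm hhle hmxle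
    have hbound : ∀ x ∈ h :: trest, x ≤ h := fun x hx =>
      hEq ▸ le_foldl_max c rest x (hperm.mem_iff.mp hx)
    rw [filterFold_eq, List.nil_append, filter_eq_replicate_count,
        take_runLen h _ hpw hbound, hperm.count_eq, hEq]

-- ===== VERDICT =====
theorem largestPalinSub_spec : Claim_equal_largestPalinSub := by
  intro s _ hpre
  unfold Spec_largestPalinSub largestPalinSub largestPalinSub_alt
  cases hl : s.toList with
  | nil => exact absurd (String.toList_eq_nil_iff.mp hl) hpre
  | cons c rest => exact main_eq c rest
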